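-- pv_equiv track=rewrite | github.com/202030481266/CP-Templates-and-Solutions | Plus题目/medium/分享K个糖果后的独特口味数量.py | shareCandies
-- ===== SOURCE A (Python) =====
-- from typing import List
--
-- from collections import defaultdict
--
-- def shareCandies(candies: List[int], k: int) -> int:
--     n = len(candies)
--     cnt = defaultdict(int)
--     tot = defaultdict(int)
--     l = 0
--     cur = 0
--     for v in candies:
--         tot[v] += 1
--     ans = 0
--     N = len(tot.keys())
--     for i in range(n):
--         cnt[candies[i]] += 1
--         if cnt[candies[i]] == tot[candies[i]]:
--             cur += 1
--         while i-l+1 > k: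
--             if cnt[candies[l]] == tot[candies[l]]:
--                 cur -= 1
--             cnt[candies[l]] -= 1
--             l += 1
--         if i-l+1 == k and N-cur > ans:
--             ans = N-cur
--     return ans
-- ===== SOURCE B (Python) =====
-- from typing import List
--
--
-- def shareCandies(candies: List[int], k: int) -> int:
--     n = len(candies)
--     if k > n:
--         return 0
--     best = 0
--     for l in range(n - k + 1):
--         best = max(best, len(set(candies[:l] + candies[l + k:])))
--     return best
-- ===== Notes on version B (the rewrite author's own statement) =====
-- stated objective: simpler
-- what changed: Replaces the sliding-window with two count dictionaries and an incrementally maintained fully-contained counter by a direct per-window computation: for each window start l, the answer candidate is simply the number of distinct flavors outside the window, len(set(candies[:l]+candies[l+k:])), maxed over all valid starts.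
import Mathlib
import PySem

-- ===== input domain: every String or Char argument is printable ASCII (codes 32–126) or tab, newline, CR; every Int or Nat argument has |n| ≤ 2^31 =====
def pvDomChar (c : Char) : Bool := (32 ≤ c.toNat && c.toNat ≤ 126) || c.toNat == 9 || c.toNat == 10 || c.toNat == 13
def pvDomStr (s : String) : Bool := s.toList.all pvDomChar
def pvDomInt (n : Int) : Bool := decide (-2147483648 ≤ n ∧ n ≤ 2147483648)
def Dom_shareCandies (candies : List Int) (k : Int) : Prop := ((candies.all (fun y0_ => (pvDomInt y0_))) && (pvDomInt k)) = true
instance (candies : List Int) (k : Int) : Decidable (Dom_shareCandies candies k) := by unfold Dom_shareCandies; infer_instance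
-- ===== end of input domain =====

-- B replaces A's sliding window (two count dicts, an incrementally maintained count of fully
-- contained flavors) by a direct per-window-start computation: the candidate answer for start l
-- is just the number of distinct flavors outside the window, len(set(candies[:l]+candies[l+k:])),
-- maxed over all starts.  Objective: simpler (B is not faster).

-- ===== PORT A =====
-- the inner 'while i-l+1 > k' loop of A; candies[l] is read with pyGetD (exact under
-- Pre_shareCandies, where l never leaves the list; outside Pre_ the Python raises IndexError)
def shareCandiesShrink (candies : List Int) (k i : Int) (tot : PySem.Dict Int Int)
    (cnt : PySem.Dict Int Int) (l : Int) (cur : Int) : PySem.Dict Int Int × Int × Int :=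
  if i - l + 1 > k then
    let cl := PySem.List.pyGetD candies l 0
    let cur' := if cnt.getD cl 0 = tot.getD cl 0 then cur - 1 else cur
    shareCandiesShrink candies k i tot (cnt.modify cl 0 (· - 1)) (l + 1) cur'
  else (cnt, l, cur)
termination_by (i - l + 1 - k).toNat
decreasing_by omega

def shareCandies (candies : List Int) (k : Int) : Int :=
  let n : Int := candies.length
  let tot : PySem.Dict Int Int := PySem.Dict.counter candies
  let N : Int := tot.keys.length
  ((PySem.List.pyRange 0 n 1).foldl (fun s i =>
      let ci := PySem.List.pyGetD candies i 0
      let cnt := s.1.modify ci 0 (· + 1)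
      let cur := if cnt.getD ci 0 = tot.getD ci 0 then s.2.2.1 + 1 else s.2.2.1
      let t := shareCandiesShrink candies k i tot cnt s.2.1 cur
      let ans := if i - t.2.1 + 1 = k ∧ N - t.2.2 > s.2.2.2 then N - t.2.2 else s.2.2.2
      (t.1, t.2.1, t.2.2, ans))
    (PySem.Dict.empty, 0, 0, 0)).2.2.2

-- ===== PORT B =====
def shareCandies_alt (candies : List Int) (k : Int) : Int :=
  let n : Int := candies.length
  if k > n then 0
  else (PySem.List.pyRange 0 (n - k + 1) 1).foldl (fun best l =>
      max best ((PySem.Set.ofList (PySem.List.slice candies none (some l) ++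
        PySem.List.slice candies (some (l + k)) none)).length : Int)) 0

-- ===== PRECONDITION & SPEC =====
-- Pre_ excludes exactly the inputs where A raises IndexError: a nonempty list with k < 0
-- (the while loop then walks l past the end of the list).
def Pre_shareCandies (candies : List Int) (k : Int) : Prop := 0 ≤ k ∨ candies = []
instance (candies : List Int) (k : Int) : Decidable (Pre_shareCandies candies k) := by
  unfold Pre_shareCandies; infer_instance
def pvWitness_shareCandies : List Int × Int := ([1, 2, 1, 3], 2)
def Spec_shareCandies (candies : List Int) (k : Int) (out : Int) : Prop := out = shareCandies_alt candies k
instance (candies : List Int) (k : Int) (out : Int) : Decidable (Spec_shareCandies candies k out) := by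
  unfold Spec_shareCandies; infer_instance

-- ===== CLAIM (what is proved, stated in full; the proofs are below) =====
def Claim_equal_shareCandies : Prop := ∀ (candies : List Int) (k : Int), Dom_shareCandies candies k → Pre_shareCandies candies k → Spec_shareCandies candies k (shareCandies candies k)

-- ===== LEMMAS AND PROOFS =====

-- number of flavors all of whose occurrences lie inside the window [l, r)
def fullIn (cs : List Int) (l r : ℕ) : ℕ :=
  (PySem.List.dedup cs).countP (fun v => ((cs.take r).drop l).count v == cs.count v)

-- the value A's ans variable holds after m iterations of the main loop (kN = k.toNat)
def ansA (cs : List Int) (kN : ℕ) : ℕ → Int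
  | 0 => 0
  | m + 1 =>
    if kN ≤ m + 1 ∧ ((PySem.List.dedup cs).length : Int) - fullIn cs (m + 1 - kN) (m + 1) > ansA cs kN m
    then ((PySem.List.dedup cs).length : Int) - fullIn cs (m + 1 - kN) (m + 1)
    else ansA cs kN m

theorem countP_switch {α : Type} [DecidableEq α] (c : α) (p q : α → Bool) :
    ∀ (xs : List α), xs.Nodup → c ∈ xs → (∀ v ∈ xs, v ≠ c → p v = q v) → p c = false →
      xs.countP q = xs.countP p + (if q c then 1 else 0) := by
  intro xs
  induction xs with
  | nil => intro _ hc _ _; cases hc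
  | cons a t ih =>
    intro hnd hc hag hpc
    rw [List.countP_cons, List.countP_cons]
    rcases List.mem_cons.1 hc with rfl | hct
    · have hteq : t.countP p = t.countP q := by
        apply List.countP_congr
        intro v hv
        have hvne : v ≠ c := fun h => (List.nodup_cons.1 hnd).1 (h ▸ hv)
        rw [hag v (List.mem_cons_of_mem _ hv) hvne]
      rw [← hteq, hpc]
      simp
    · have hane : a ≠ c := by
        rintro rfl
        exact (List.nodup_cons.1 hnd).1 hct
      have hrec := ih (List.nodup_cons.1 hnd).2 hct
        (fun v hv hne => hag v (List.mem_cons_of_mem _ hv) hne) hpc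
      rw [hrec, hag a (List.mem_cons_self) hane]
      exact Nat.add_right_comm _ _ _

theorem window_sublist (cs : List Int) (l r : ℕ) : ((cs.take r).drop l).Sublist cs :=
  ((cs.take r).drop_sublist l).trans (cs.take_sublist r)

theorem fullIn_empty (cs : List Int) (l : ℕ) : fullIn cs l l = 0 := by
  unfold fullIn
  apply List.countP_eq_zero.2
  intro v hv
  have hmem : v ∈ cs := (PySem.List.mem_dedup cs v).1 hv
  have hnil : (cs.take l).drop l = [] := List.drop_eq_nil_iff.2 (by simp)
  rw [hnil]
  have hne : cs.count v ≠ 0 := by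
    simp only [ne_eq, List.count_eq_zero]
    exact fun h => h hmem
  simp only [List.count_nil, beq_iff_eq]
  omega

theorem fullIn_extend (cs : List Int) (l r : ℕ) (hl : l ≤ r) (hr : r < cs.length) :
    fullIn cs l (r + 1) =
      fullIn cs l r + (if ((cs.take (r + 1)).drop l).count (cs[r]'hr) == cs.count (cs[r]'hr) then 1 else 0) := by
  have hsplit : (cs.take (r + 1)).drop l = (cs.take r).drop l ++ [cs[r]'hr] := by
    rw [List.take_add_one, List.getElem?_eq_getElem hr]
    simp only [Option.toList_some]
    rw [List.drop_append_of_le_length (by simp; omega)]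
  unfold fullIn
  apply countP_switch (cs[r]'hr) _ _ _ (PySem.List.nodup_dedup cs)
    ((PySem.List.mem_dedup cs _).2 (List.getElem_mem hr))
  · intro v hv hvne
    have hc : ((cs.take (r + 1)).drop l).count v = ((cs.take r).drop l).count v := by
      rw [hsplit, List.count_append, List.count_singleton]
      simp [beq_eq_false_iff_ne.2 (Ne.symm hvne)]
    rw [hc]
  · have h1 : ((cs.take (r + 1)).drop l).count (cs[r]'hr) = ((cs.take r).drop l).count (cs[r]'hr) + 1 := by
      rw [hsplit, List.count_append, List.count_singleton]
      simp
    have h2 : ((cs.take (r + 1)).drop l).count (cs[r]'hr) ≤ cs.count (cs[r]'hr) :=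
      (window_sublist cs l (r + 1)).count_le _
    rw [beq_eq_false_iff_ne]
    omega

theorem fullIn_shrink (cs : List Int) (l r : ℕ) (hl : l < r) (hr : r ≤ cs.length) :
    fullIn cs l r =
      fullIn cs (l + 1) r +
        (if ((cs.take r).drop l).count (cs[l]'(by omega)) == cs.count (cs[l]'(by omega)) then 1 else 0) := by
  have hlr : l < (cs.take r).length := by simp; omega
  have hgl : (cs.take r)[l]'hlr = cs[l]'(by omega) := List.getElem_take
  have hsplit : (cs.take r).drop l = (cs[l]'(by omega)) :: (cs.take r).drop (l + 1) := by
    rw [List.drop_eq_getElem_cons hlr, hgl]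
  unfold fullIn
  apply countP_switch (cs[l]'(by omega)) _ _ _ (PySem.List.nodup_dedup cs)
    ((PySem.List.mem_dedup cs _).2 (List.getElem_mem (by omega)))
  · intro v hv hvne
    have hc : ((cs.take r).drop l).count v = ((cs.take r).drop (l + 1)).count v := by
      rw [hsplit, List.count_cons]
      simp [beq_eq_false_iff_ne.2 (Ne.symm hvne)]
    rw [hc]
  · have h1 : ((cs.take r).drop l).count (cs[l]'(by omega)) =
        ((cs.take r).drop (l + 1)).count (cs[l]'(by omega)) + 1 := by
      rw [hsplit, List.count_cons]
      simp
    have h2 : ((cs.take r).drop l).count (cs[l]'(by omega)) ≤ cs.count (cs[l]'(by omega)) :=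
      (window_sublist cs l r).count_le _
    rw [beq_eq_false_iff_ne]
    omega

theorem dedup_sub_length (xs ys : List Int) (h : ∀ y ∈ ys, y ∈ xs) :
    (PySem.List.dedup ys).length = (PySem.List.dedup xs).countP (fun v => decide (v ∈ ys)) := by
  rw [List.countP_eq_length_filter]
  rw [← List.toFinset_card_of_nodup (PySem.List.nodup_dedup ys),
    ← List.toFinset_card_of_nodup (List.Nodup.filter _ (PySem.List.nodup_dedup xs))]
  congr 1
  ext z
  simp only [List.mem_toFinset, List.mem_filter, PySem.List.mem_dedup, decide_eq_true_eq]
  exact ⟨fun hz => ⟨h z hz, hz⟩, fun hz => hz.2⟩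

theorem dedup_outside (cs : List Int) (l m : ℕ) (hlm : l ≤ m) (hm : m ≤ cs.length) :
    (PySem.List.dedup (cs.take l ++ cs.drop m)).length + fullIn cs l m = (PySem.List.dedup cs).length := by
  have hsub : ∀ y ∈ cs.take l ++ cs.drop m, y ∈ cs := by
    intro y hy
    rcases List.mem_append.1 hy with h | h
    exacts [List.mem_of_mem_take h, List.mem_of_mem_drop h]
  have hdecomp : cs.take l ++ (((cs.take m).drop l) ++ cs.drop m) = cs := by
    rw [← List.append_assoc]
    have h1 : cs.take l = (cs.take m).take l := by rw [List.take_take, min_eq_left hlm]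
    rw [h1, List.take_append_drop, List.take_append_drop]
  have hcount : ∀ v : Int, cs.count v = (cs.take l ++ cs.drop m).count v + ((cs.take m).drop l).count v := by
    intro v
    conv_lhs => rw [← hdecomp]
    simp only [List.count_append]
    omega
  rw [dedup_sub_length cs _ hsub,
    List.length_eq_countP_add_countP (fun v => decide (v ∈ cs.take l ++ cs.drop m)) (l := PySem.List.dedup cs)]
  congr 1
  unfold fullIn
  apply List.countP_congr
  intro v hv
  simp only [beq_iff_eq, decide_eq_true_eq]
  have hct := hcount v
  have hvc : cs.count v ≠ 0 := by
    simp only [ne_eq, List.count_eq_zero]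
    exact fun h => h ((PySem.List.mem_dedup cs v).1 hv)
  by_cases hmem : v ∈ cs.take l ++ cs.drop m
  · have h0 : (cs.take l ++ cs.drop m).count v ≠ 0 := by
      simp only [ne_eq, List.count_eq_zero]
      exact fun h => h hmem
    simp only [hmem, not_true, iff_false]
    omega
  · have h0 : (cs.take l ++ cs.drop m).count v = 0 := List.count_eq_zero.2 hmem
    simp only [hmem, not_false_eq_true, iff_true]
    omega

theorem A_loop (cs : List Int) (k : Int) (hk : 0 ≤ k) (m : ℕ) (hm : m ≤ cs.length) :
    ∃ cnt : PySem.Dict Int Int,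
      (((List.range m).map (fun j : ℕ => (j : Int))).foldl (fun s i =>
          let ci := PySem.List.pyGetD cs i 0
          let cnt := s.1.modify ci 0 (· + 1)
          let cur := if cnt.getD ci 0 = (PySem.Dict.counter cs).getD ci 0 then s.2.2.1 + 1 else s.2.2.1
          let t := shareCandiesShrink cs k i (PySem.Dict.counter cs) cnt s.2.1 cur
          let ans := if i - t.2.1 + 1 = k ∧ ((PySem.Dict.counter cs).keys.length : Int) - t.2.2 > s.2.2.2 then ((PySem.Dict.counter cs).keys.length : Int) - t.2.2 else s.2.2.2
          (t.1, t.2.1, t.2.2, ans))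
        ((PySem.Dict.empty : PySem.Dict Int Int), 0, 0, 0)) =
        (cnt, ((m - k.toNat : ℕ) : Int), (fullIn cs (m - k.toNat) m : Int), ansA cs k.toNat m) ∧
      ∀ v : Int, cnt.getD v 0 = (((cs.take m).drop (m - k.toNat)).count v : Int) := by
  induction m with
  | zero =>
    refine ⟨PySem.Dict.empty, ?_, ?_⟩
    · simp [fullIn_empty, ansA]
    · intro v
      simp [PySem.Dict.getD_empty]
  | succ m ih =>
    obtain ⟨cnt, hfold, hcnt⟩ := ih (by omega)
    have hm' : m < cs.length := by omega
    have hkk : k = (k.toNat : Int) := (Int.toNat_of_nonneg hk).symm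
    rw [List.range_succ, List.map_append, List.foldl_append, hfold]
    simp only [List.map_cons, List.map_nil, List.foldl_cons, List.foldl_nil]
    have hci : PySem.List.pyGetD cs ((m : ℕ) : Int) 0 = cs[m]'hm' := by
      rw [PySem.List.pyGetD_eq_getElem cs 0 (by positivity) (by exact_mod_cast hm')]
      simp
    rw [hci]
    have hsplit : (cs.take (m + 1)).drop (m - k.toNat) = (cs.take m).drop (m - k.toNat) ++ [cs[m]'hm'] := by
      rw [List.take_add_one, List.getElem?_eq_getElem hm']
      simp only [Option.toList_some]
      rw [List.drop_append_of_le_length (by simp; omega)]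
    have hcnt1 : ∀ v, ((cnt.modify (cs[m]'hm') 0 (· + 1)).getD v 0) =
        ((((cs.take (m + 1)).drop (m - k.toNat)).count v : ℕ) : Int) := by
      intro v
      rw [PySem.Dict.getD_modify]
      by_cases hv : v = cs[m]'hm'
      · rw [if_pos hv, hv, hcnt (cs[m]'hm'), hsplit, List.count_append, List.count_singleton,
          beq_self_eq_true]
        simp only [if_true]
        push_cast
        ring
      · rw [if_neg hv, hcnt v, hsplit, List.count_append, List.count_singleton]
        simp [beq_eq_false_iff_ne.2 (Ne.symm hv)]
    have hcur1 : (if (cnt.modify (cs[m]'hm') 0 (· + 1)).getD (cs[m]'hm') 0 = (PySem.Dict.counter cs).getD (cs[m]'hm') 0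
        then ((fullIn cs (m - k.toNat) m : ℕ) : Int) + 1 else ((fullIn cs (m - k.toNat) m : ℕ) : Int))
        = ((fullIn cs (m - k.toNat) (m + 1) : ℕ) : Int) := by
      rw [fullIn_extend cs (m - k.toNat) m (by omega) hm']
      rw [hcnt1, PySem.Dict.getD_counter]
      by_cases h : (((cs.take (m + 1)).drop (m - k.toNat)).count (cs[m]'hm') == cs.count (cs[m]'hm')) = true
      · rw [if_pos (by exact_mod_cast beq_iff_eq.1 h), if_pos h]
        push_cast
        ring
      · rw [if_neg (fun hh => h (beq_iff_eq.2 (by exact_mod_cast hh))), if_neg h]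
        push_cast
        ring
    rw [hcur1]
    have hN : ((PySem.Dict.counter cs).keys.length : Int) = ((PySem.List.dedup cs).length : Int) := by
      rw [PySem.Dict.keys_counter, ← PySem.List.dedup_eq_ofList]
    by_cases hc : k.toNat ≤ m
    · -- the while loop runs exactly once
      have hl1 : (0 : Int) ≤ ((m - k.toNat : ℕ) : Int) := by positivity
      have hcl : PySem.List.pyGetD cs ((m - k.toNat : ℕ) : Int) 0 = cs[m - k.toNat]'(by omega) := by
        rw [PySem.List.pyGetD_eq_getElem cs 0 hl1 (by exact_mod_cast (by omega : m - k.toNat < cs.length))]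
        simp
      have hsplit2 : (cs.take (m + 1)).drop (m - k.toNat) =
          (cs[m - k.toNat]'(by omega)) :: (cs.take (m + 1)).drop (m - k.toNat + 1) := by
        have hlr : m - k.toNat < (cs.take (m + 1)).length := by simp; omega
        rw [List.drop_eq_getElem_cons hlr]
        congr 1
        exact List.getElem_take
      have hcur2 : (if (cnt.modify (cs[m]'hm') 0 (· + 1)).getD (cs[m - k.toNat]'(by omega)) 0 =
            (PySem.Dict.counter cs).getD (cs[m - k.toNat]'(by omega)) 0
          then ((fullIn cs (m - k.toNat) (m + 1) : ℕ) : Int) - 1 else ((fullIn cs (m - k.toNat) (m + 1) : ℕ) : Int))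
          = ((fullIn cs (m - k.toNat + 1) (m + 1) : ℕ) : Int) := by
        rw [hcnt1, PySem.Dict.getD_counter]
        rw [fullIn_shrink cs (m - k.toNat) (m + 1) (by omega) (by omega)]
        by_cases h : (((cs.take (m + 1)).drop (m - k.toNat)).count (cs[m - k.toNat]'(by omega)) ==
            cs.count (cs[m - k.toNat]'(by omega))) = true
        · rw [if_pos (by exact_mod_cast beq_iff_eq.1 h), if_pos h]
          push_cast
          ring
        · rw [if_neg (fun hh => h (beq_iff_eq.2 (by exact_mod_cast hh))), if_neg h]
          push_cast
          ring
      have hcnt2 : ∀ v, (((cnt.modify (cs[m]'hm') 0 (· + 1)).modify (cs[m - k.toNat]'(by omega)) 0 (· - 1)).getD v 0) =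
          ((((cs.take (m + 1)).drop (m - k.toNat + 1)).count v : ℕ) : Int) := by
        intro v
        rw [PySem.Dict.getD_modify]
        by_cases hv : v = cs[m - k.toNat]'(by omega)
        · rw [if_pos hv, hv, hcnt1]
          have hcc : ((cs.take (m + 1)).drop (m - k.toNat)).count (cs[m - k.toNat]'(by omega)) =
              ((cs.take (m + 1)).drop (m - k.toNat + 1)).count (cs[m - k.toNat]'(by omega)) + 1 := by
            rw [hsplit2, List.count_cons]
            simp
          rw [hcc]
          push_cast
          ring
        · rw [if_neg hv, hcnt1 v]
          have hcc : ((cs.take (m + 1)).drop (m - k.toNat)).count v =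
              ((cs.take (m + 1)).drop (m - k.toNat + 1)).count v := by
            rw [hsplit2, List.count_cons]
            simp [beq_eq_false_iff_ne.2 (Ne.symm hv)]
          rw [hcc]
      have hshr : shareCandiesShrink cs k ((m : ℕ) : Int) (PySem.Dict.counter cs)
          (cnt.modify (cs[m]'hm') 0 (· + 1)) ((m - k.toNat : ℕ) : Int)
          ((fullIn cs (m - k.toNat) (m + 1) : ℕ) : Int)
          = ((cnt.modify (cs[m]'hm') 0 (· + 1)).modify (cs[m - k.toNat]'(by omega)) 0 (· - 1),
             ((m - k.toNat : ℕ) : Int) + 1,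
             ((fullIn cs (m - k.toNat + 1) (m + 1) : ℕ) : Int)) := by
        rw [shareCandiesShrink, if_pos (by omega)]
        dsimp only
        rw [hcl, hcur2]
        rw [shareCandiesShrink, if_neg (by omega)]
      rw [hshr]
      refine ⟨(cnt.modify (cs[m]'hm') 0 (· + 1)).modify (cs[m - k.toNat]'(by omega)) 0 (· - 1), ?_, ?_⟩
      · dsimp only
        rw [hN]
        have he1 : ((m - k.toNat : ℕ) : Int) + 1 = ((m + 1 - k.toNat : ℕ) : Int) := by omega
        have he2 : m - k.toNat + 1 = m + 1 - k.toNat := by omega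
        simp only [Prod.mk.injEq]
        refine ⟨by trivial, he1, by rw [he2], ?_⟩
        rw [ansA, he2]
        have hcond : (((m : ℕ) : Int) - (((m - k.toNat : ℕ) : Int) + 1) + 1 = k) ↔ (k.toNat ≤ m + 1) := by
          omega
        exact if_congr (and_congr_left' hcond) rfl rfl
      · intro v
        rw [hcnt2 v, show m + 1 - k.toNat = m - k.toNat + 1 from by omega]
    · -- window not yet full: the while loop does not run
      have h0 : m - k.toNat = 0 := by omega
      have h0' : m + 1 - k.toNat = 0 := by omega
      have hshr : shareCandiesShrink cs k ((m : ℕ) : Int) (PySem.Dict.counter cs)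
          (cnt.modify (cs[m]'hm') 0 (· + 1)) ((m - k.toNat : ℕ) : Int)
          ((fullIn cs (m - k.toNat) (m + 1) : ℕ) : Int)
          = (cnt.modify (cs[m]'hm') 0 (· + 1), ((m - k.toNat : ℕ) : Int),
             ((fullIn cs (m - k.toNat) (m + 1) : ℕ) : Int)) := by
        rw [shareCandiesShrink, if_neg (by omega)]
      rw [hshr]
      refine ⟨cnt.modify (cs[m]'hm') 0 (· + 1), ?_, ?_⟩
      · dsimp only
        rw [hN]
        simp only [Prod.mk.injEq]
        refine ⟨by trivial, by omega, by rw [show m + 1 - k.toNat = m - k.toNat from by omega], ?_⟩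
        rw [ansA, show m + 1 - k.toNat = m - k.toNat from by omega]
        have hcond : (((m : ℕ) : Int) - ((m - k.toNat : ℕ) : Int) + 1 = k) ↔ (k.toNat ≤ m + 1) := by
          omega
        exact if_congr (and_congr_left' hcond) rfl rfl
      · intro v
        rw [hcnt1 v, show m + 1 - k.toNat = m - k.toNat from by omega]

theorem shareCandies_eq_ansA (cs : List Int) (k : Int) (hk : 0 ≤ k) :
    shareCandies cs k = ansA cs k.toNat cs.length := by
  obtain ⟨cnt, hfold, -⟩ := A_loop cs k hk cs.length le_rfl
  simp only [shareCandies]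
  rw [PySem.List.pyRange_zero_nat, hfold]

theorem alt_eq_fold (cs : List Int) (k : Int) (hk : 0 ≤ k) (hkn : k ≤ (cs.length : Int)) :
    shareCandies_alt cs k =
      (List.range (cs.length - k.toNat + 1)).foldl
        (fun b l => max b (((PySem.List.dedup cs).length : Int) - fullIn cs l (l + k.toNat))) 0 := by
  unfold shareCandies_alt
  rw [if_neg (by omega)]
  have hlen : (cs.length : Int) - k + 1 = ((cs.length - k.toNat + 1 : ℕ) : Int) := by omega
  rw [hlen, PySem.List.pyRange_zero_nat, List.foldl_map]
  apply PySem.List.foldl_congr_mem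
  intro b l hl
  have hl' : l ≤ cs.length - k.toNat := by
    have := List.mem_range.1 hl
    omega
  rw [PySem.List.slice_to cs (by positivity), PySem.List.slice_from cs (by omega)]
  have h1 : ((l : ℕ) : Int).toNat = l := Int.toNat_natCast l
  have h2 : (((l : ℕ) : Int) + k).toNat = l + k.toNat := by omega
  rw [h1, h2, ← PySem.List.dedup_eq_ofList]
  have hout := dedup_outside cs l (l + k.toNat) (by omega) (by omega)
  congr 1
  omega

theorem foldl_max_absorb {α : Type} (c : Int) : ∀ (t : List α), t.foldl (fun b _ => max b c) c = c := by
  intro t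
  induction t with
  | nil => rfl
  | cons a t ih =>
    rw [List.foldl_cons, max_self]
    exact ih

theorem ansA_fold (cs : List Int) (kN : ℕ) (hk1 : 1 ≤ kN) :
    ∀ m, ansA cs kN m = (List.range (m + 1 - kN)).foldl
      (fun b l => max b (((PySem.List.dedup cs).length : Int) - fullIn cs l (l + kN))) 0 := by
  intro m
  induction m with
  | zero =>
    have : 0 + 1 - kN = 0 := by omega
    rw [this]
    simp [ansA]
  | succ m ih =>
    rw [ansA, ih]
    by_cases h : kN ≤ m + 1
    · have hr : m + 1 + 1 - kN = (m + 1 - kN) + 1 := by omega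
      rw [hr, List.range_succ, List.foldl_append]
      simp only [List.foldl_cons, List.foldl_nil]
      have hidx : m + 1 - kN + kN = m + 1 := by omega
      rw [hidx]
      split_ifs with hgt <;> omega
    · have hr : m + 1 + 1 - kN = m + 1 - kN := by omega
      rw [hr, if_neg (fun hh => h hh.1)]

theorem ansA_zero_k (cs : List Int) :
    ∀ m, ansA cs 0 (m + 1) = ((PySem.List.dedup cs).length : Int) := by
  intro m
  induction m with
  | zero =>
    rw [ansA]
    simp only [ansA, Nat.sub_zero, fullIn_empty, Nat.cast_zero, sub_zero]
    split_ifs <;> omega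
  | succ m ih =>
    rw [ansA, ih]
    simp only [Nat.sub_zero, fullIn_empty, Nat.cast_zero, sub_zero]
    split_ifs <;> omega

theorem main_eq (cs : List Int) (k : Int) (hk : 0 ≤ k) :
    shareCandies cs k = shareCandies_alt cs k := by
  rcases lt_or_ge ((cs.length : Int)) k with hbig | hkn
  · -- k > n: no window ever reaches size k; both return 0
    rw [shareCandies_eq_ansA cs k hk]
    have hA : ∀ m, m ≤ cs.length → ansA cs k.toNat m = 0 := by
      intro m
      induction m with
      | zero => intro _; rfl
      | succ m ihm =>
        intro hm
        rw [ansA, if_neg (fun hh => by omega), ihm (by omega)]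
    rw [hA cs.length le_rfl]
    unfold shareCandies_alt
    rw [if_pos (by omega)]
  · by_cases hk0 : k.toNat = 0
    · -- k = 0: the answer is the total number of distinct flavors
      have hkz : k = 0 := by omega
      subst hkz
      rw [shareCandies_eq_ansA cs 0 le_rfl, alt_eq_fold cs 0 le_rfl hkn]
      have hfold : (List.range (cs.length - (0 : Int).toNat + 1)).foldl
          (fun b l => max b (((PySem.List.dedup cs).length : Int) - fullIn cs l (l + (0 : Int).toNat))) 0 =
          (List.range (cs.length + 1)).foldl
          (fun b _ => max b ((PySem.List.dedup cs).length : Int)) 0 := by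
        have : cs.length - (0 : Int).toNat + 1 = cs.length + 1 := by omega
        rw [this]
        apply PySem.List.foldl_congr_mem
        intro b l _
        have : l + (0 : Int).toNat = l := by omega
        rw [this, fullIn_empty]
        simp
      rw [hfold]
      cases hcs : cs.length with
      | zero =>
        have : cs = [] := List.eq_nil_of_length_eq_zero hcs
        subst this
        simp [ansA, PySem.List.dedup]
      | succ n =>
        rw [hk0, ansA_zero_k cs n]
        rw [List.range_succ_eq_map, List.foldl_cons]
        have hmax : max 0 ((PySem.List.dedup cs).length : Int) = ((PySem.List.dedup cs).length : Int) := by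
          omega
        rw [hmax]
        exact (foldl_max_absorb _ _).symm
    · -- 1 ≤ k ≤ n
      rw [shareCandies_eq_ansA cs k hk, alt_eq_fold cs k hk hkn,
        ansA_fold cs k.toNat (by omega) cs.length]
      have : cs.length + 1 - k.toNat = cs.length - k.toNat + 1 := by omega
      rw [this]

theorem empty_eq (k : Int) : shareCandies [] k = shareCandies_alt [] k := by
  have hA : shareCandies [] k = 0 := by
    simp only [shareCandies, List.length_nil, Nat.cast_zero]
    rw [PySem.List.pyRange_one_eq_nil le_rfl]
    rfl
  rw [hA]
  symm
  simp only [shareCandies_alt, List.length_nil, Nat.cast_zero]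
  by_cases hkpos : k > (0 : Int)
  · rw [if_pos hkpos]
  · rw [if_neg hkpos]
    refine (PySem.List.foldl_congr_mem _ _ (fun best (_ : Int) => max best (0 : Int)) 0 ?_).trans
      (foldl_max_absorb 0 _)
    intro b l hl
    have hl0 : 0 ≤ l := (PySem.List.mem_pyRange_one.1 hl).1
    rw [PySem.List.slice_to _ hl0, PySem.List.slice_some_none]
    simp [PySem.Set.ofList]

-- ===== VERDICT (by name: the statement is the Claim_ definition above) =====
theorem shareCandies_spec : Claim_equal_shareCandies := by
  intro candies k _ hpre
  unfold Spec_shareCandies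
  rcases hpre with hk | rfl
  · exact main_eq candies k hk
  · exact empty_eq k
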